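-- pv_equiv track=rewrite | github.com/g200kg/kicad-gerberzipper2 | plugins/gerber_zipper_2_action.py | tabexp
-- ===== SOURCE A (Python) =====
-- def tabexp(str,tabTable):
--     strList = str.split('\t')
--     result = ''
--     curColumn = 0
--     strIdx = 0
--     nextTab = 0
--     for strCur in strList:
--         strCur = strCur[:(tabTable[strIdx]-1)]
--         while curColumn < nextTab:
--             curColumn += 1
--             result += ' '
--         result += strCur
--         curColumn += len(strCur)
--         nextTab += tabTable[strIdx]
--         strIdx += 1
--     return result
-- ===== SOURCE B (Python) =====
-- def tabexp(str, tabTable):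
--     segs = str.split('\t')
--     widths = [tabTable[i] for i in range(len(segs))]  # raises IndexError, like A, if tabTable too short
--     trunc = [s[:w - 1] for s, w in zip(segs, widths)]
--     starts = []
--     total = 0
--     for w in widths:
--         starts.append(total)
--         total += w
--     pieces = []
--     pos = 0
--     for s, start in zip(trunc, starts):
--         if pos < start:
--             pieces.append(' ' * (start - pos))
--             pos = start
--         pieces.append(s)
--         pos += len(s)
--     return ''.join(pieces)
-- ===== Notes on version B (the rewrite author's own statement) =====
-- stated objective: alternative
-- what changed: B replaces A's single stateful loop with char-by-char space padding by separate vectorized passes: gather the needed widths by index (raising where A does), truncate all segments with zip, precompute each segment's target start column as a prefix sum, then place segments with batch ' '*gap padding and one final join.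
import Mathlib
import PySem

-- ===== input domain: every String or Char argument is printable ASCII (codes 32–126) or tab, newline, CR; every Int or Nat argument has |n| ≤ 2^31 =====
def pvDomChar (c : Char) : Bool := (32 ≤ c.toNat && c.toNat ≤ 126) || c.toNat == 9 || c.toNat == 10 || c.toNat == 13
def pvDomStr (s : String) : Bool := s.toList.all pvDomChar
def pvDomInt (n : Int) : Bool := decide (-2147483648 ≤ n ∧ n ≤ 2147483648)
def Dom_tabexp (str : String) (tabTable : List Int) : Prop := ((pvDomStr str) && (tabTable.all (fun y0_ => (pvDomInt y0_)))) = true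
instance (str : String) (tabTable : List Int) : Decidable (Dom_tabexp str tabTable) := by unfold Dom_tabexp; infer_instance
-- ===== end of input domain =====

-- B replaces A's single stateful loop (char-by-char space padding, running column counter)
-- by separate vectorized passes: gather widths by index, truncate segments via zip, prefix-sum
-- start columns, batch-pad and join; return values are proved equal on Pre_ (where A returns).

-- ===== PORT A =====
-- the 'while curColumn < nextTab: curColumn += 1; result += " "' loop of A
def tabexpPad (curColumn nextTab : Int) (result : List Char) : Int × List Char :=
  if curColumn < nextTab then tabexpPad (curColumn + 1) nextTab (result ++ [' ']) else (curColumn, result)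
termination_by (nextTab - curColumn).toNat
decreasing_by omega

-- the 'for strCur in strList' loop of A; state (result, curColumn, strIdx, nextTab)
def tabexpGo (tabTable : List Int) : List (List Char) → List Char → Int → Nat → Int → List Char
  | [], result, _, _, _ => result
  | strCur :: strList, result, curColumn, strIdx, nextTab =>
    match PySem.List.pyGet? tabTable (strIdx : Int) with
    | none => result  -- tabTable[strIdx] raises IndexError: excluded by Pre_tabexp
    | some t =>
      let strCur' := PySem.List.slice strCur none (some (t - 1))
      let p := tabexpPad curColumn nextTab result
      tabexpGo tabTable strList (p.2 ++ strCur') (p.1 + (strCur'.length : Int)) (strIdx + 1) (nextTab + t)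

def tabexp (str : String) (tabTable : List Int) : String :=
  String.ofList (tabexpGo tabTable (PySem.Chars.splitOn str.toList ['\t']) [] 0 0 0)

-- ===== PORT B =====
-- B's prefix-sum loop 'for w in widths' (pieces of state (starts, total)) is the foldl below;
-- B's third loop 'for s, start in zip(trunc, starts)' with state (pieces, pos):
def altPlace : List (List Char × Int) → List (List Char) × Int → List (List Char) × Int
  | [], acc => acc
  | (s, start) :: rest, (pieces, pos) =>
    let acc1 : List (List Char) × Int :=
      if pos < start then (pieces ++ [List.replicate (start - pos).toNat ' '], start) else (pieces, pos)
    altPlace rest (acc1.1 ++ [s], acc1.2 + (s.length : Int))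

def tabexp_alt (str : String) (tabTable : List Int) : String :=
  let segs := PySem.Chars.splitOn str.toList ['\t']
  -- '[tabTable[i] for i in range(len(segs))]'; pyGetD's default is a totality guard only:
  -- under Pre_tabexp every index is in range (outside Pre_ the Python raises IndexError here)
  let widths := (PySem.List.pyRange 0 (segs.length : Int) 1).map (fun i => PySem.List.pyGetD tabTable i 0)
  let trunc := (segs.zip widths).map (fun p => PySem.List.slice p.1 none (some (p.2 - 1)))
  let starts := (widths.foldl (fun (acc : List Int × Int) w => (acc.1 ++ [acc.2], acc.2 + w)) ([], 0)).1
  String.ofList (PySem.Chars.join [] (altPlace (trunc.zip starts) ([], 0)).1)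

-- ===== PRECONDITION & SPEC =====
-- Pre_ excludes exactly the inputs where A raises IndexError (more tab-separated segments than
-- tabTable entries); B raises there too.
def Pre_tabexp (str : String) (tabTable : List Int) : Prop :=
  (PySem.Chars.splitOn str.toList ['\t']).length ≤ tabTable.length
instance (str : String) (tabTable : List Int) : Decidable (Pre_tabexp str tabTable) := by
  unfold Pre_tabexp; infer_instance
def pvWitness_tabexp : String × List Int := ("ab\tc", [4, 3])

def Spec_tabexp (str : String) (tabTable : List Int) (out : String) : Prop := out = tabexp_alt str tabTable
instance (str : String) (tabTable : List Int) (out : String) : Decidable (Spec_tabexp str tabTable out) := by unfold Spec_tabexp; infer_instance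

-- ===== CLAIM (what is proved, stated in full; the proofs are below) =====
def Claim_equal_tabexp : Prop := ∀ (str : String) (tabTable : List Int), Dom_tabexp str tabTable → Pre_tabexp str tabTable → Spec_tabexp str tabTable (tabexp str tabTable)

-- ===== LEMMAS AND PROOFS =====

-- common reference recursion: segment list and width list consumed together
def tabRef : List (List Char) → List Int → Int → Int → List Char
  | [], _, _, _ => []
  | _ :: _, [], _, _ => []
  | s :: ss, t :: ts, pos, start =>
    let sc := PySem.List.slice s none (some (t - 1))
    List.replicate (start - pos).toNat ' ' ++ sc ++ tabRef ss ts (max pos start + (sc.length : Int)) (start + t)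

theorem tabexpPad_eq (curColumn nextTab : Int) (result : List Char) :
    tabexpPad curColumn nextTab result
      = (max curColumn nextTab, result ++ List.replicate (nextTab - curColumn).toNat ' ') := by
  fun_induction tabexpPad curColumn nextTab result with
  | case1 c res hlt ih =>
    rw [ih]
    have h1 : max (c + 1) nextTab = max c nextTab := by omega
    have h2 : (nextTab - c).toNat = (nextTab - (c+1)).toNat + 1 := by omega
    rw [h1, h2]
    simp [List.replicate_succ, List.append_assoc]
  | case2 c res hge =>
    have h0 : (nextTab - c).toNat = 0 := by omega
    simp [h0, max_eq_left (by omega : nextTab ≤ c)]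

theorem tabexpGo_ref (ss : List (List Char)) :
    ∀ (pre ts : List Int) (res : List Char) (cur next : Int),
    ss.length ≤ ts.length →
    tabexpGo (pre ++ ts) ss res cur pre.length next = res ++ tabRef ss ts cur next := by
  induction ss with
  | nil => intro pre ts res cur next _; simp [tabexpGo, tabRef]
  | cons s ss ih =>
    intro pre ts res cur next hlen
    cases ts with
    | nil => simp at hlen
    | cons t ts =>
      simp only [tabexpGo, PySem.List.pyGet?_append_length, tabexpPad_eq]
      have hre : pre ++ t :: ts = (pre ++ [t]) ++ ts := by simp
      have hlen' : (pre.length + 1) = (pre ++ [t]).length := by simp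
      rw [hre, hlen', ih (pre ++ [t]) ts _ _ _ (by simpa using hlen)]
      simp [tabRef, List.append_assoc]

-- B's prefix-sum loop produces the start columns
def startsList : List Int → Int → List Int
  | [], _ => []
  | w :: ws, total => total :: startsList ws (total + w)

theorem starts_foldl (ws : List Int) :
    ∀ (acc : List Int) (total : Int),
    (ws.foldl (fun (acc : List Int × Int) w => (acc.1 ++ [acc.2], acc.2 + w)) (acc, total)).1
      = acc ++ startsList ws total := by
  induction ws with
  | nil => intro acc total; simp [startsList]
  | cons w ws ih => intro acc total; simp [List.foldl, startsList, ih, List.append_assoc]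

theorem join_nil_flatten (l : List (List Char)) : PySem.Chars.join [] l = l.flatten := by
  induction l with
  | nil => simp [PySem.Chars.join_nil]
  | cons a l ih =>
    cases l with
    | nil => simp [PySem.Chars.join_singleton]
    | cons b r => rw [PySem.Chars.join_cons_cons, ih]; simp

theorem altPlace_ref (ss : List (List Char)) :
    ∀ (ts : List Int) (pieces : List (List Char)) (pos total : Int),
    ss.length = ts.length →
    ((altPlace (((ss.zip ts).map (fun p => PySem.List.slice p.1 none (some (p.2 - 1)))).zip
        (startsList ts total)) (pieces, pos)).1).flatten
      = pieces.flatten ++ tabRef ss ts pos total := by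
  induction ss with
  | nil =>
    intro ts pieces pos total hlen
    have : ts = [] := by cases ts <;> simp_all
    subst this; simp [altPlace, tabRef, startsList]
  | cons s ss ih =>
    intro ts pieces pos total hlen
    cases ts with
    | nil => simp at hlen
    | cons t ts =>
      simp only [List.zip_cons_cons, List.map_cons, startsList, altPlace]
      by_cases h : pos < total
      · rw [if_pos h, ih ts _ _ _ (by simpa using hlen)]
        simp [tabRef, List.append_assoc, max_eq_right (le_of_lt h)]
      · rw [if_neg h, ih ts _ _ _ (by simpa using hlen)]
        have h0 : (total - pos).toNat = 0 := by omega
        simp [tabRef, h0, List.append_assoc, max_eq_left (by omega : total ≤ pos)]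

theorem zip_take_self {α β : Type} (ss : List α) : ∀ (ts : List β), ss.zip ts = ss.zip (ts.take ss.length) := by
  induction ss with
  | nil => intro ts; simp
  | cons s ss ih =>
    intro ts; cases ts with
    | nil => simp
    | cons t ts => simp [List.zip_cons_cons, ih ts]

theorem tabRef_take (ss : List (List Char)) :
    ∀ (ts : List Int) (pos total : Int),
    tabRef ss (ts.take ss.length) pos total = tabRef ss ts pos total := by
  induction ss with
  | nil => intro ts pos total; cases ts <;> simp [tabRef]
  | cons s ss ih =>
    intro ts pos total
    cases ts with
    | nil => simp [tabRef]
    | cons t ts => simp only [List.length_cons, List.take_succ_cons, tabRef, ih ts]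

-- under Pre_, B's width-gathering pass is tabTable.take segs.length
theorem widths_eq_take (l : List Int) (n : Nat) (h : n ≤ l.length) :
    (PySem.List.pyRange 0 (n : Int) 1).map (fun i => PySem.List.pyGetD l i 0) = l.take n := by
  induction n with
  | zero => simp [PySem.List.pyRange]
  | succ m ih =>
    have hm : m ≤ l.length := by omega
    rw [show ((m + 1 : Nat) : Int) = (m : Int) + 1 by push_cast; ring,
      PySem.List.pyRange_one_succ_right (a := 0) (b := (m : Int)) (by omega)]
    · rw [List.map_append, ih hm]
      simp only [List.map_cons, List.map_nil, PySem.List.pyGetD_natCast]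
      rw [List.take_succ]
      have hg : l.getD m 0 = l[m]'(by omega) := by
        simp [List.getD_eq_getElem?_getD, List.getElem?_eq_getElem (by omega : m < l.length)]
      simp [hg, List.getElem?_eq_getElem (by omega : m < l.length)]

-- ===== VERDICT (by name: the statement is the Claim_ definition above) =====
theorem tabexp_spec : Claim_equal_tabexp := by
  intro str tabTable _ hpre
  unfold Spec_tabexp tabexp tabexp_alt
  set segs := PySem.Chars.splitOn str.toList ['\t'] with hsegs
  have hle : segs.length ≤ tabTable.length := hpre
  -- A side
  have hA : tabexpGo tabTable segs [] 0 0 0 = tabRef segs tabTable 0 0 := by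
    have := tabexpGo_ref segs [] tabTable [] 0 0 hle
    simpa using this
  -- B side
  have hw : (PySem.List.pyRange 0 (segs.length : Int) 1).map (fun i => PySem.List.pyGetD tabTable i 0)
      = tabTable.take segs.length := widths_eq_take tabTable segs.length hle
  have hzip : segs.zip (tabTable.take segs.length) = segs.zip tabTable := (zip_take_self segs tabTable).symm
  have hlen2 : segs.length = (tabTable.take segs.length).length := by
    simp [List.length_take, Nat.min_eq_left hle]
  have hstarts :
      ((tabTable.take segs.length).foldl
        (fun (acc : List Int × Int) w => (acc.1 ++ [acc.2], acc.2 + w)) (([] : List Int), (0:Int))).1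
        = startsList (tabTable.take segs.length) 0 := by
    simpa using starts_foldl (tabTable.take segs.length) [] 0
  have hB := altPlace_ref segs (tabTable.take segs.length) [] 0 0 hlen2
  rw [hA]
  simp only [hw, hstarts]
  rw [join_nil_flatten, hB, ← tabRef_take segs tabTable 0 0]
  simp
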